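-- pv_equiv track=rewrite | github.com/giridharan1129/python-practice-solutions | move-ve_elements.py | segregateElements
-- ===== SOURCE A (Python) =====
-- def segregateElements(arr):
--         b=[]
--         d=[]
--         for i in range(len(arr)):
--             if arr[i]<0:
--                 b.append(arr[i])
--             else:
--                 d.append(arr[i])
--         c=d+b
--         return c
-- ===== SOURCE B (Python) =====
-- def segregateElements(arr):
--     # Stable sort on the sign predicate: non-negatives (key False) first,
--     # negatives (key True) last, each group in original relative order.
--     return sorted(arr, key=lambda x: x < 0)
-- ===== Notes on version B (the rewrite author's own statement) =====
-- stated objective: idiomatic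
-- what changed: Replaces the explicit index loop with two appended accumulator lists by a single stable sort on the boolean sign key (sorted(arr, key=lambda x: x < 0)), whose stability reproduces d+b exactly.
import Mathlib
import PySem

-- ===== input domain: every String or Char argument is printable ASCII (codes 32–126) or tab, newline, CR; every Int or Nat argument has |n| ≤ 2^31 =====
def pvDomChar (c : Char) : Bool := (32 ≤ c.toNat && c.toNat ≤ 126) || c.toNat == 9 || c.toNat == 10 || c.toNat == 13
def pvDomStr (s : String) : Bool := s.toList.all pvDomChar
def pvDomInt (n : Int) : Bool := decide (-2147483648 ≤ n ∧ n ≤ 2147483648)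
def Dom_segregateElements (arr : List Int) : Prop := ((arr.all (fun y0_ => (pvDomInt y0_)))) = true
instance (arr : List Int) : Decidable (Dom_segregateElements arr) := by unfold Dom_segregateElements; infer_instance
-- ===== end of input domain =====

-- B replaces A's index loop with two accumulators by one stable sort on the
-- boolean sign key; same values, idiomatic one-liner (no speed claim).

-- ===== PORT A =====
-- index i of the loop is always in range, so arr[i] is pyGetD arr i 0 (exact here)
def segregateElements (arr : List Int) : List Int :=
  let r := (PySem.List.pyRange 0 (PySem.List.len arr) 1).foldl
      (fun (bd : List Int × List Int) i =>
        let v := PySem.List.pyGetD arr i 0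
        if v < 0 then (bd.1 ++ [v], bd.2) else (bd.1, bd.2 ++ [v]))
      ([], [])
  r.2 ++ r.1

-- ===== PORT B =====
def segregateElements_alt (arr : List Int) : List Int :=
  PySem.List.sorted arr (fun x => decide (x < 0)) false

-- ===== PRECONDITION & SPEC =====
def Spec_segregateElements (arr : List Int) (out : List Int) : Prop := out = segregateElements_alt arr
instance (arr : List Int) (out : List Int) : Decidable (Spec_segregateElements arr out) := by unfold Spec_segregateElements; infer_instance

-- ===== CLAIM (what is proved, stated in full; the proofs are below) =====
def Claim_equal_segregateElements : Prop := ∀ (arr : List Int), Dom_segregateElements arr → Spec_segregateElements arr (segregateElements arr)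

-- ===== LEMMAS AND PROOFS =====

-- A's loop accumulates the two filters.
theorem pvA_foldl (arr : List Int) (b d : List Int) :
    arr.foldl (fun (bd : List Int × List Int) v =>
        if v < 0 then (bd.1 ++ [v], bd.2) else (bd.1, bd.2 ++ [v])) (b, d)
      = (b ++ arr.filter (fun v => decide (v < 0)),
         d ++ arr.filter (fun v => decide (¬ v < 0))) := by
  induction arr generalizing b d with
  | nil => simp
  | cons x xs ih =>
    by_cases hx : x < 0
    · simp [hx, ih]
    · have hx' : (0:Int) ≤ x := by omega
      simp [hx, ih, hx']

-- inserting an element whose key is maximal goes to the end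
theorem pvInsert_neg (x : Int) (hx : x < 0) (ys : List Int) :
    PySem.List.insertBy (fun a b => decide ((decide (a < 0)) < (decide (b < 0)))) x ys
      = ys ++ [x] := by
  apply PySem.List.insertBy_of_forall_not_before
  intro y _
  simp [hx]

-- inserting a non-negative element into (nonnegs ++ negs) lands between the groups
theorem pvInsert_nonneg (x : Int) (hx : ¬ x < 0) (d b : List Int)
    (hd : ∀ y ∈ d, ¬ y < 0) (hb : ∀ y ∈ b, y < 0) :
    PySem.List.insertBy (fun a b => decide ((decide (a < 0)) < (decide (b < 0)))) x (d ++ b)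
      = d ++ x :: b := by
  induction d with
  | nil =>
    cases b with
    | nil => rfl
    | cons y ys =>
      have hy : y < 0 := hb y (by simp)
      simp [PySem.List.insertBy, hx, hy]
  | cons z zs ih =>
    have hz : ¬ z < 0 := hd z (by simp)
    have ih' := ih (fun y hy => hd y (by simp [hy]))
    simp [PySem.List.insertBy, hx, hz] at ih' ⊢
    exact ih'

-- B's insertion-sort fold keeps the two groups separated and in order.
theorem pvB_foldl (arr : List Int) (d b : List Int)
    (hd : ∀ y ∈ d, ¬ y < 0) (hb : ∀ y ∈ b, y < 0) :
    arr.foldl (fun acc x =>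
        PySem.List.insertBy (fun a b => decide ((fun x => decide (x < 0)) a < (fun x => decide (x < 0)) b)) x acc)
      (d ++ b)
      = (d ++ arr.filter (fun v => decide (¬ v < 0))) ++ (b ++ arr.filter (fun v => decide (v < 0))) := by
  induction arr generalizing d b with
  | nil => simp
  | cons x xs ih =>
    by_cases hx : x < 0
    · have step : PySem.List.insertBy (fun a b => decide ((decide (a < 0)) < (decide (b < 0)))) x (d ++ b) = (d ++ b) ++ [x] :=
        pvInsert_neg x hx (d ++ b)
      have hb' : ∀ y ∈ b ++ [x], y < 0 := by
        intro y hy; rcases List.mem_append.mp hy with h | h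
        · exact hb y h
        · simp at h; omega
      have := ih d (b ++ [x]) hd hb'
      simp only [List.foldl_cons, step, List.append_assoc] at this ⊢
      simp [hx, this]
    · have step := pvInsert_nonneg x hx d b hd hb
      have hd' : ∀ y ∈ d ++ [x], ¬ y < 0 := by
        intro y hy; rcases List.mem_append.mp hy with h | h
        · exact hd y h
        · simp at h; omega
      have := ih (d ++ [x]) b hd' hb
      simp only [List.foldl_cons, step] at this ⊢
      have hrw : d ++ x :: b = (d ++ [x]) ++ b := by simp
      rw [hrw, this]
      have hx' : (0:Int) ≤ x := by omega
      simp [hx']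

-- ===== VERDICT (by name: the statement is the Claim_ definition above) =====
theorem segregateElements_spec : Claim_equal_segregateElements := by
  intro arr _
  unfold Spec_segregateElements segregateElements segregateElements_alt
  rw [PySem.List.sorted_eq_foldl_insertBy]
  have hA := PySem.List.foldl_pyRange_zero_pyGetD arr 0
    (fun (bd : List Int × List Int) v =>
      if v < 0 then (bd.1 ++ [v], bd.2) else (bd.1, bd.2 ++ [v])) (([], []) : List Int × List Int)
  have hB := pvB_foldl arr [] [] (by simp) (by simp)
  simp only [List.nil_append] at hB
  simp only [PySem.List.len_eq] at hA ⊢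
  rw [hA, pvA_foldl, hB]
  simp
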